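-- pv_equiv track=rewrite | github.com/rightthumb/rightthumb-widgets-v0 | widgets/python/imdb-old.py | extractUrl
-- ===== SOURCE A (Python) =====
-- def extractUrl(string):
-- 	string = string.replace('/url?q=','')
--
-- 	stringy = string.split('/')
-- 	theLength = len(stringy)
-- 	result = ''
-- 	i = 0
-- 	for segment in stringy:
-- 		i += 1
-- 		if not i == theLength:
-- 			result += segment + '/'
-- 	return result
-- ===== SOURCE B (Python) =====
-- def extractUrl(string):
-- 	string = string.replace('/url?q=','')
-- 	return string[:string.rfind('/') + 1]
-- ===== Notes on version B (the rewrite author's own statement) =====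
-- stated objective: simpler
-- what changed: Instead of splitting on '/' and re-joining all segments but the last in an indexed loop, B locates the last slash with rfind and returns the prefix slice up to and including it (rfind = -1 gives the empty string, matching A's no-slash case).
import Mathlib
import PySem

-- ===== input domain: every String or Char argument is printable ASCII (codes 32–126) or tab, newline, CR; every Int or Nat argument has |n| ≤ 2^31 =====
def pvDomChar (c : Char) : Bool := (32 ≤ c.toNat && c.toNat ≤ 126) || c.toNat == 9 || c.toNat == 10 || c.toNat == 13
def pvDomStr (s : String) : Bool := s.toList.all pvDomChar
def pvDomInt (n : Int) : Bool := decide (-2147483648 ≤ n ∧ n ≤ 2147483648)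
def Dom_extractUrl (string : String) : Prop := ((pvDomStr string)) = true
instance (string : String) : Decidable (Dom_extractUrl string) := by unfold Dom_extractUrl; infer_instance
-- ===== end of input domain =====

-- B replaces A's split-on-'/' + indexed rejoin loop by a single rfind and a prefix slice (simpler).

-- ===== PORT A =====
def extractUrl (string : String) : String :=
  let s := PySem.Chars.replace string.toList "/url?q=".toList "".toList
  let stringy := PySem.Chars.splitOn s ['/']
  let theLength := stringy.length
  let r := stringy.foldl (fun (st : Nat × List Char) segment =>
      let i := st.1 + 1
      (i, if i ≠ theLength then st.2 ++ segment ++ ['/'] else st.2)) (0, ([] : List Char))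
  String.ofList r.2

-- ===== PORT B =====
def extractUrl_alt (string : String) : String :=
  let s := PySem.Chars.replace string.toList "/url?q=".toList "".toList
  String.ofList (PySem.Chars.slice s none (some (PySem.Chars.rfind s ['/'] + 1)))

-- ===== PRECONDITION & SPEC =====
def Spec_extractUrl (string : String) (out : String) : Prop := out = extractUrl_alt string
instance (string : String) (out : String) : Decidable (Spec_extractUrl string out) := by unfold Spec_extractUrl; infer_instance

-- ===== CLAIM (what is proved, stated in full; the proofs are below) =====
def Claim_equal_extractUrl : Prop := ∀ (string : String), Dom_extractUrl string → Spec_extractUrl string (extractUrl string)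

-- ===== LEMMAS AND PROOFS =====

-- "keep everything up to and including the last c" — common specification both ports are reduced to
def midL (c : Char) : List Char → List Char
  | [] => []
  | x :: t => if c ∈ x :: t then x :: midL c t else []

-- a plain structural split on a single character (proof-side mirror of PySem.Chars.splitOn)
def splitC (c : Char) : List Char → List (List Char)
  | [] => [[]]
  | x :: t => if x = c then [] :: splitC c t else (splitC c t).modifyHead (x :: ·)

lemma splitC_ne_nil (c : Char) (l : List Char) : splitC c l ≠ [] := by
  cases l with
  | nil => simp [splitC]
  | cons x t =>
    simp only [splitC]
    split_ifs
    · exact (List.cons_ne_nil _ _)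
    · cases h : splitC c t with
      | nil => exact absurd h (splitC_ne_nil c t)
      | cons a s => simp

lemma splitC_length (c : Char) (l : List Char) :
    (splitC c l).length = l.count c + 1 := by
  induction l with
  | nil => simp [splitC]
  | cons x t ih =>
    simp only [splitC]
    split_ifs with h
    · subst h; simp [ih]
    · cases hs : splitC c t with
      | nil => exact absurd hs (splitC_ne_nil c t)
      | cons a s =>
        simp [hs] at ih
        simp [h, ih]

lemma splitOn_go_eq (c : Char) :
    ∀ (fuel : Nat) (l cur : List Char) (acc : List (List Char)),
      l.length < fuel →
      PySem.Chars.splitOn.go [c] fuel l cur acc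
        = acc.reverse ++ (splitC c l).modifyHead (cur.reverse ++ ·) := by
  intro fuel
  induction fuel with
  | zero => intro l cur acc h; omega
  | succ f ih =>
    intro l cur acc h
    cases l with
    | nil =>
      simp [PySem.Chars.splitOn.go, splitC]
    | cons x rest =>
      simp only [PySem.Chars.splitOn.go]
      by_cases hx : x = c
      · have hpre : List.isPrefixOf [c] (x :: rest) = true := by
          simp [List.isPrefixOf, hx]
        rw [if_pos hpre]
        simp only [List.length_cons] at h
        have := ih rest [] (cur.reverse :: acc) (by omega)
        simp only [List.length_singleton, List.drop_succ_cons, List.drop_zero] at *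
        rw [this]
        simp only [splitC, if_pos hx]
        cases hsr : splitC c rest with
        | nil => exact absurd hsr (splitC_ne_nil c rest)
        | cons a s => simp
      · have hpre : List.isPrefixOf [c] (x :: rest) = false := by
          simp [List.isPrefixOf]; exact fun hc => absurd hc.symm hx
        rw [if_neg (by simp [hpre])]
        simp only [List.length_cons] at h
        rw [ih rest (x :: cur) acc (by omega)]
        simp only [splitC, if_neg hx]
        cases hs : splitC c rest with
        | nil => exact absurd hs (splitC_ne_nil c rest)
        | cons a s => simp

lemma splitOn_eq_splitC (c : Char) (l : List Char) :
    PySem.Chars.splitOn l [c] = splitC c l := by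
  show PySem.Chars.splitOn.go [c] (l.length + 1) l [] [] = _
  rw [splitOn_go_eq c (l.length + 1) l [] [] (by omega)]
  cases hs : splitC c l with
  | nil => exact absurd hs (splitC_ne_nil c l)
  | cons a s => simp

lemma count_eq_zero_iff_splitC (c : Char) (l : List Char) :
    l.count c = 0 ↔ ∃ h, splitC c l = [h] := by
  constructor
  · intro h0
    cases hs : splitC c l with
    | nil => exact absurd hs (splitC_ne_nil c l)
    | cons a s =>
      have hlen := splitC_length c l
      rw [hs, h0] at hlen
      simp at hlen
      subst hlen
      exact ⟨a, rfl⟩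
  · rintro ⟨h, hs⟩
    have := splitC_length c l
    rw [hs] at this
    simpa using this.symm

-- A's loop result (all segments but the last, each followed by '/') equals midL
lemma splitC_flatten_eq_midL (c : Char) (l : List Char) :
    ((splitC c l).dropLast.map (· ++ [c])).flatten = midL c l := by
  induction l with
  | nil => simp [splitC, midL]
  | cons x t ih =>
    simp only [splitC, midL]
    by_cases hx : x = c
    · rw [if_pos hx, if_pos (by simp [hx])]
      cases hs : splitC c t with
      | nil => exact absurd hs (splitC_ne_nil c t)
      | cons a s =>
        rw [hs] at ih
        simp only [List.dropLast_cons₂, List.map_cons, List.flatten_cons]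
        simpa [hx] using congrArg (c :: ·) ih
    · rw [if_neg hx]
      cases hs : splitC c t with
      | nil => exact absurd hs (splitC_ne_nil c t)
      | cons a s =>
        rw [hs] at ih
        cases s with
        | nil =>
          have hnot : c ∉ t := by
            have h0 : t.count c = 0 := by
              rcases (count_eq_zero_iff_splitC c t).mpr ⟨a, hs⟩ with h
              exact h
            exact List.count_eq_zero.mp h0
          have hmem : c ∉ x :: t := by
            intro hc
            rcases List.mem_cons.mp hc with h | h
            · exact hx h.symm
            · exact hnot h
          rw [if_neg hmem]
          simp
        | cons b s' =>
          have hmem : c ∈ t := by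
            by_contra hc
            have h0 : t.count c = 0 := List.count_eq_zero.mpr hc
            rcases (count_eq_zero_iff_splitC c t).mp h0 with ⟨h, hh⟩
            rw [hs] at hh; simp at hh
          rw [if_pos (by simp [hmem])]
          simp only [List.modifyHead, List.dropLast_cons₂, List.map_cons, List.flatten_cons]
          simp only [List.dropLast_cons₂, List.map_cons, List.flatten_cons] at ih
          rw [← ih]
          simp

-- the indexed fold of port A, in closed form
lemma foldA (c : Char) :
    ∀ (ps : List (List Char)) (n k : Nat) (r : List Char), k + ps.length = n →
      (ps.foldl (fun (st : Nat × List Char) segment =>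
          let i := st.1 + 1
          (i, if i ≠ n then st.2 ++ segment ++ [c] else st.2)) (k, r)).2
        = r ++ (ps.dropLast.map (· ++ [c])).flatten := by
  intro ps
  induction ps with
  | nil => intro n k r h; simp
  | cons seg rest ih =>
    intro n k r h
    simp only [List.foldl_cons]
    by_cases hlast : rest = []
    · subst hlast
      simp only [List.length_cons, List.length_nil] at h
      have : k + 1 = n := by omega
      simp [this]
    · have hne : k + 1 ≠ n := by
        simp only [List.length_cons] at h
        have : 0 < rest.length := List.length_pos_iff.mpr hlast
        omega
      simp only [if_pos hne]
      rw [ih n (k + 1) (r ++ seg ++ [c]) (by simp only [List.length_cons] at h; omega)]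
      rw [List.dropLast_cons_of_ne_nil hlast]
      simp

-- midL is stable under appending a non-c char, and swallows an appended c
lemma midL_append_ne (c d : Char) (hd : d ≠ c) (l : List Char) :
    midL c (l ++ [d]) = midL c l := by
  induction l with
  | nil => simp [midL, Ne.symm hd]
  | cons x t ih =>
    rw [List.cons_append]
    show (if c ∈ x :: (t ++ [d]) then x :: midL c (t ++ [d]) else [])
        = (if c ∈ x :: t then x :: midL c t else [])
    rw [ih]
    by_cases hm : c ∈ x :: t
    · rw [if_pos hm, if_pos (by
        rcases List.mem_cons.mp hm with h | h
        · exact List.mem_cons.mpr (Or.inl h)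
        · exact List.mem_cons.mpr (Or.inr (List.mem_append.mpr (Or.inl h))))]
    · rw [if_neg hm, if_neg (by
        intro hc
        rcases List.mem_cons.mp hc with h | h
        · exact hm (List.mem_cons.mpr (Or.inl h))
        · rcases List.mem_append.mp h with h2 | h2
          · exact hm (List.mem_cons.mpr (Or.inr h2))
          · exact hd (List.mem_singleton.mp h2).symm)]

lemma midL_append_self (c : Char) (l : List Char) :
    midL c (l ++ [c]) = l ++ [c] := by
  induction l with
  | nil => simp [midL]
  | cons x t ih =>
    rw [List.cons_append]
    show (if c ∈ x :: (t ++ [c]) then x :: midL c (t ++ [c]) else []) = _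
    rw [if_pos (by simp), ih]

-- rfind.go characterised through take/midL
lemma rfind_go_take (c : Char) (cs : List Char) :
    ∀ j : Nat, cs.take ((PySem.Chars.rfind.go cs [c] j) + 1).toNat
      = midL c (cs.take (j + 1)) := by
  intro j
  induction j with
  | zero =>
    simp only [PySem.Chars.rfind.go]
    cases cs with
    | nil => simp [midL]
    | cons x t =>
      by_cases hx : x = c
      · rw [if_pos (by simp [List.isPrefixOf, hx])]
        simp [midL, hx]
      · rw [if_neg (by simp [List.isPrefixOf]; intro h; exact hx h.symm)]
        simp [midL]
        intro h; exact hx h.symm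
  | succ j ih =>
    show cs.take ((if List.isPrefixOf [c] (List.drop (j + 1) cs) then ((j : Int) + 1) else PySem.Chars.rfind.go cs [c] j) + 1).toNat = _
    by_cases hle : j + 1 < cs.length
    · by_cases hc : cs[j + 1]'hle = c
      · have hpre : List.isPrefixOf [c] (List.drop (j + 1) cs) = true := by
          rw [List.drop_eq_getElem_cons hle]
          simp [List.isPrefixOf, hc]
        rw [if_pos hpre]
        have htake : cs.take (j + 1 + 1) = cs.take (j + 1) ++ [c] := by
          rw [List.take_add_one]
          simp [List.getElem?_eq_getElem hle, hc]
        have hnat : ((j : Int) + 1 + 1).toNat = j + 1 + 1 := by omega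
        rw [hnat, htake, midL_append_self]
      · have hpre : List.isPrefixOf [c] (List.drop (j + 1) cs) = false := by
          rw [List.drop_eq_getElem_cons hle]
          simp [List.isPrefixOf]
          intro h; exact hc h.symm
        rw [if_neg (by simp [hpre])]
        have htake : cs.take (j + 1 + 1) = cs.take (j + 1) ++ [cs[j + 1]'hle] := by
          rw [List.take_add_one]
          simp [List.getElem?_eq_getElem hle]
        rw [htake, midL_append_ne c _ hc, ih]
    · have hpre : List.isPrefixOf [c] (List.drop (j + 1) cs) = false := by
        rw [List.drop_eq_nil_of_le (by omega)]
        simp [List.isPrefixOf]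
      rw [if_neg (by simp [hpre])]
      have h1 : cs.take (j + 1 + 1) = cs := List.take_of_length_le (by omega)
      have h2 : cs.take (j + 1) = cs := List.take_of_length_le (by omega)
      rw [h1]
      rw [h2] at ih
      exact ih

lemma rfind_take_eq_midL (c : Char) (cs : List Char) :
    cs.take ((PySem.Chars.rfind cs [c]) + 1).toNat = midL c cs := by
  show cs.take ((PySem.Chars.rfind.go cs [c] cs.length) + 1).toNat = _
  rw [rfind_go_take c cs cs.length, List.take_of_length_le (by omega)]

lemma rfind_go_ge_neg_one (c : Char) (cs : List Char) (j : Nat) :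
    -1 ≤ PySem.Chars.rfind.go cs [c] j := by
  induction j with
  | zero => simp only [PySem.Chars.rfind.go]; split_ifs <;> omega
  | succ j ih =>
    show -1 ≤ (if List.isPrefixOf [c] (List.drop (j + 1) cs) then ((j : Int) + 1) else PySem.Chars.rfind.go cs [c] j)
    split_ifs with h
    · omega
    · exact ih

-- ===== VERDICT (by name: the statement is the Claim_ definition above) =====
theorem extractUrl_spec : Claim_equal_extractUrl := by
  intro string _
  unfold Spec_extractUrl extractUrl extractUrl_alt
  simp only
  set cs := PySem.Chars.replace string.toList "/url?q=".toList "".toList with hcs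
  congr 1
  have hslice : PySem.Chars.slice cs none (some (PySem.Chars.rfind cs ['/'] + 1))
      = cs.take ((PySem.Chars.rfind cs ['/'] + 1)).toNat := by
    have h0 : 0 ≤ PySem.Chars.rfind cs ['/'] + 1 := by
      have := rfind_go_ge_neg_one '/' cs cs.length
      show 0 ≤ PySem.Chars.rfind.go cs ['/'] cs.length + 1
      omega
    simpa using PySem.List.slice_to cs h0
  rw [hslice, rfind_take_eq_midL]
  rw [foldA '/' (PySem.Chars.splitOn cs ['/']) (PySem.Chars.splitOn cs ['/']).length 0 [] (by omega)]
  rw [splitOn_eq_splitC, splitC_flatten_eq_midL]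
  simp
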